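-- pv_equiv track=rewrite | github.com/kylemd/xero-rpt-cm | tools/fix_broken_chart.py | _find_unique_nearby_code
-- ===== SOURCE A (Python) =====
-- from typing import Dict, List, Tuple, Optional, Set
--
-- def _find_unique_nearby_code(base_code: str, used: Set[str]) -> str:
--     """Return a unique alphanumeric code based on base_code by appending A..Z, then AA..AZ if needed."""
--     if base_code not in used:
--         return base_code
--     suffixes = [chr(c) for c in range(ord('A'), ord('Z')+1)]
--     # Try single letter suffixes
--     for s in suffixes:
--         cand = f"{base_code}{s}"
--         if cand not in used:
--             return cand
--     # Fallback: double-letter suffixes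
--     for s1 in suffixes:
--         for s2 in suffixes:
--             cand = f"{base_code}{s1}{s2}"
--             if cand not in used:
--                 return cand
--     # Final fallback: numeric sequence
--     i = 1
--     while True:
--         cand = f"{base_code}{i}"
--         if cand not in used:
--             return cand
--         i += 1
-- ===== SOURCE B (Python) =====
-- def _rank(suf):
--     """Map a suffix string to its position in the candidate order:
--     '' -> 0, 'A'..'Z' -> 1..26, 'AA'..'ZZ' -> 27..702; None if not of that shape."""
--     if len(suf) == 0:
--         return 0
--     if len(suf) == 1:
--         k = ord(suf) - 65
--         return 1 + k if 0 <= k < 26 else None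
--     if len(suf) == 2:
--         k1 = ord(suf[0]) - 65
--         k2 = ord(suf[1]) - 65
--         if 0 <= k1 < 26 and 0 <= k2 < 26:
--             return 27 + 26 * k1 + k2
--         return None
--     return None
--
--
-- def _decode(r):
--     """Inverse of _rank on 0..702."""
--     if r == 0:
--         return ""
--     if r <= 26:
--         return chr(64 + r)
--     q, m = divmod(r - 27, 26)
--     return chr(65 + q) + chr(65 + m)
--
--
-- def _find_unique_nearby_code(base_code, used):
--     """Index the used codes by suffix rank, then return base_code plus the
--     suffix of the first free rank; fall back to counting upward."""
--     n = len(base_code)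
--     occupied = [False] * 703
--     for u in used:
--         if u.startswith(base_code):
--             r = _rank(u[n:])
--             if r is not None:
--                 occupied[r] = True
--     for r in range(703):
--         if not occupied[r]:
--             return base_code + _decode(r)
--     i = 1
--     while True:
--         if base_code + str(i) not in used:
--             return base_code + str(i)
--         i += 1
-- ===== Notes on version B (the rewrite author's own statement) =====
-- stated objective: alternative
-- what changed: A generates candidates (base, base+A..Z, base+AA..ZZ) and tests each against the set; B instead makes one pass over the used codes, marking in a 703-entry boolean table which letter-suffix ranks are taken, then returns the first free rank decoded arithmetically (divmod), keeping the numeric count-up only as the final fallback.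
import Mathlib
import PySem

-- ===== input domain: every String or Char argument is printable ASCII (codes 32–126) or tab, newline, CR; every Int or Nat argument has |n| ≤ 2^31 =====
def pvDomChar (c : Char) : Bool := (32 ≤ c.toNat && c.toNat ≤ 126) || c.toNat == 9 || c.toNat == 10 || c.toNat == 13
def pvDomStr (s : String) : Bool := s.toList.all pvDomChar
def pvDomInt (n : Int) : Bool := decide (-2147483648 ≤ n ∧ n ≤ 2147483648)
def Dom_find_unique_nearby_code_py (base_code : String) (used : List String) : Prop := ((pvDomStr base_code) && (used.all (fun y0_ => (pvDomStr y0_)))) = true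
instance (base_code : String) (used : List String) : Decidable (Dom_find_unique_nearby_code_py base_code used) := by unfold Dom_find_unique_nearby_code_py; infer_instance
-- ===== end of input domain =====

-- B replaces A's generate-and-test over a staged candidate stream by an index:
-- one pass over `used` marks, in a 703-entry boolean table, which letter-suffix
-- ranks are taken; the answer is the first free rank, decoded arithmetically
-- (objective: alternative; same cost). Both Pythons' final numeric loops are
-- unbounded; the ports bound them with fuel |used|+1, which by pigeonhole is
-- never exhausted (the fuel-0 branch is unreachable).

-- ===== PORT A =====
-- [chr(c) for c in range(ord('A'), ord('Z')+1)]
def pvSuffixesA : List String :=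
  (PySem.List.pyRange 65 91 1).map (fun c => String.singleton (Char.ofNat c.toNat))

-- the final 'i = 1; while True: ...' loop, totalised with fuel (unreachable at fuel 0)
def pvNumLoopA (base : String) (used : List String) : Nat → Int → String
  | 0, i => base ++ PySem.Int.toStr i
  | fuel+1, i =>
      let cand := base ++ PySem.Int.toStr i
      if used.contains cand then pvNumLoopA base used fuel (i+1) else cand

def find_unique_nearby_code_py (base_code : String) (used : List String) : String :=
  if !(used.contains base_code) then base_code
  else
    -- for s in suffixes: return first unused base+s
    match (pvSuffixesA.map (fun s => base_code ++ s)).find? (fun c => !(used.contains c)) with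
    | some c => c
    | none =>
      -- nested for s1 / for s2 with early return = find-first over the flattened candidates
      match (pvSuffixesA.flatMap (fun s1 => pvSuffixesA.map (fun s2 => base_code ++ s1 ++ s2))).find?
              (fun c => !(used.contains c)) with
      | some c => c
      | none => pvNumLoopA base_code used (used.length + 1) 1

-- ===== PORT B =====
-- _rank: '' -> 0, 'A'..'Z' -> 1..26, 'AA'..'ZZ' -> 27..702, else None
def pvRankB (suf : List Char) : Option Nat :=
  match suf with
  | [] => some 0
  | [c] =>
      let k : Int := (c.toNat : Int) - 65
      if 0 ≤ k ∧ k < 26 then some (1 + k.toNat) else none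
  | [c1, c2] =>
      let k1 : Int := (c1.toNat : Int) - 65
      let k2 : Int := (c2.toNat : Int) - 65
      if (0 ≤ k1 ∧ k1 < 26) ∧ (0 ≤ k2 ∧ k2 < 26) then some (27 + 26 * k1.toNat + k2.toNat)
      else none
  | _ => none

-- _decode (r is a Nat here: B only calls it on 0..702, divmod on nonneg = Nat / %)
def pvDecodeB (r : Nat) : String :=
  if r = 0 then ""
  else if r ≤ 26 then String.singleton (Char.ofNat (64 + r))
  else String.singleton (Char.ofNat (65 + (r - 27) / 26)) ++ String.singleton (Char.ofNat (65 + (r - 27) % 26))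

-- the marking pass: occupied = [False]*703; for u in used: ... occupied[r] = True
-- (u[n:] with n = len(base_code) ≥ 0 is exactly List.drop on the char list)
def pvOccB (base_code : String) (used : List String) : List Bool :=
  used.foldl (fun occ u =>
    if PySem.Chars.startswith u.toList base_code.toList then
      match pvRankB (u.toList.drop base_code.toList.length) with
      | some r => occ.set r true
      | none => occ
    else occ) (List.replicate 703 false)

-- the final 'i = 1; while True: ...' loop, totalised with fuel (unreachable at fuel 0)
def pvNumLoopB (base : String) (used : List String) : Nat → Int → String
  | 0, i => base ++ PySem.Int.toStr i
  | fuel+1, i =>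
      let cand := base ++ PySem.Int.toStr i
      if used.contains cand then pvNumLoopB base used fuel (i+1) else cand

def find_unique_nearby_code_py_alt (base_code : String) (used : List String) : String :=
  -- occupied := pvOccB …; for r in range(703): if not occupied[r]: return base_code + _decode(r)
  -- (the range elements are nonnegative, so .toNat is exact)
  match (PySem.List.pyRange 0 703 1).find? (fun r => !((pvOccB base_code used).getD r.toNat false)) with
  | some r => base_code ++ pvDecodeB r.toNat
  | none => pvNumLoopB base_code used (used.length + 1) 1

-- ===== PRECONDITION & SPEC =====
def Spec_find_unique_nearby_code_py (base_code : String) (used : List String) (out : String) : Prop := out = find_unique_nearby_code_py_alt base_code used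
instance (base_code : String) (used : List String) (out : String) : Decidable (Spec_find_unique_nearby_code_py base_code used out) := by unfold Spec_find_unique_nearby_code_py; infer_instance

-- ===== CLAIM (what is proved, stated in full; the proofs are below) =====
def Claim_equal_find_unique_nearby_code_py : Prop := ∀ (base_code : String) (used : List String), Dom_find_unique_nearby_code_py base_code used → Spec_find_unique_nearby_code_py base_code used (find_unique_nearby_code_py base_code used)

-- ===== LEMMAS AND PROOFS =====

-- the two fuel loops are the same recursion
theorem pvNumLoop_eq (base : String) (used : List String) :
    ∀ (fuel : Nat) (i : Int), pvNumLoopA base used fuel i = pvNumLoopB base used fuel i := by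
  intro fuel
  induction fuel with
  | zero => intro i; rfl
  | succ n ih =>
      intro i
      simp only [pvNumLoopA, pvNumLoopB]
      split <;> simp [ih]

-- decoding ranks 0..702 in order yields exactly A's suffix stream
theorem pvDecode_enum :
    (List.range 703).map pvDecodeB
      = "" :: (pvSuffixesA ++ pvSuffixesA.flatMap (fun s1 => pvSuffixesA.map (fun s2 => s1 ++ s2))) := by
  set_option maxRecDepth 100000 in decide

-- rank inverts decode on 0..702
theorem pvRank_decode : ∀ r < 703, pvRankB (pvDecodeB r).toList = some r := by
  set_option maxRecDepth 100000 in decide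

-- decode determines rank: any suffix with a rank is the decoding of that rank
theorem pvRank_some (s : List Char) (r : Nat) (h : pvRankB s = some r) :
    r < 703 ∧ s = (pvDecodeB r).toList := by
  rcases s with _ | ⟨c, _ | ⟨c2, _ | ⟨c3, rest⟩⟩⟩
  · simp [pvRankB] at h
    subst h
    simp [pvDecodeB]
  · simp only [pvRankB] at h
    split at h
    · rename_i hk
      obtain rfl : r = 1 + ((c.toNat : Int) - 65).toNat := (Option.some.inj h).symm
      refine ⟨by omega, ?_⟩
      have hc : 64 + (1 + ((c.toNat : Int) - 65).toNat) = c.toNat := by omega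
      simp [pvDecodeB, (by omega : 1 + ((c.toNat : Int) - 65).toNat ≤ 26), hc, Char.ofNat_toNat]
    · exact absurd h (by simp)
  · simp only [pvRankB] at h
    split at h
    · rename_i hk
      obtain rfl : r = 27 + 26 * ((c.toNat : Int) - 65).toNat + ((c2.toNat : Int) - 65).toNat :=
        (Option.some.inj h).symm
      set a := ((c.toNat : Int) - 65).toNat with ha
      set b := ((c2.toNat : Int) - 65).toNat with hb
      have hab : a < 26 ∧ b < 26 := by constructor <;> omega
      refine ⟨by omega, ?_⟩
      have hq : (27 + 26 * a + b - 27) / 26 = a := by omega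
      have hm : (27 + 26 * a + b - 27) % 26 = b := by omega
      have h1 : 65 + a = c.toNat := by omega
      have h2 : 65 + b = c2.toNat := by omega
      unfold pvDecodeB
      rw [if_neg (by omega), if_neg (by omega), hq, hm, h1, h2]
      simp [Char.ofNat_toNat]
    · exact absurd h (by simp)
  · simp [pvRankB] at h

-- the rank test on one used code is the membership test on one decoded candidate
theorem pvHit_eq (base u : String) (r : Nat) (hr : r < 703) :
    ((if PySem.Chars.startswith u.toList base.toList then
        pvRankB (u.toList.drop base.toList.length) else none) == some r)
      = decide (u = base ++ pvDecodeB r) := by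
  rw [Bool.eq_iff_iff]
  simp only [beq_iff_eq, decide_eq_true_eq]
  constructor
  · intro h
    split at h
    · rename_i hpre
      have hpre' : base.toList <+: u.toList := by
        simpa [PySem.Chars.startswith] using hpre
      obtain ⟨t, ht⟩ := hpre'
      have hd : u.toList.drop base.toList.length = t := by rw [← ht]; exact List.drop_left
      have h2 := (pvRank_some _ _ h).2
      apply String.toList_inj.mp
      rw [String.toList_append, ← ht, ← hd, h2]
    · exact absurd h (by simp)
  · intro h
    subst h
    have hpre : PySem.Chars.startswith (base ++ pvDecodeB r).toList base.toList = true := by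
      simp [PySem.Chars.startswith, String.toList_append, List.isPrefixOf_iff_prefix]
    rw [if_pos hpre]
    rw [String.toList_append, List.drop_left]
    exact pvRank_decode r hr

-- the marking fold, with a general initial table
theorem pvOcc_fold (base : String) (used : List String) (occ : List Bool)
    (hlen : occ.length = 703) (r : Nat) (hr : r < 703) :
    (used.foldl (fun occ u =>
      if PySem.Chars.startswith u.toList base.toList then
        match pvRankB (u.toList.drop base.toList.length) with
        | some r' => occ.set r' true
        | none => occ
      else occ) occ).getD r false
    = (occ.getD r false
        || used.any (fun u =>
             (if PySem.Chars.startswith u.toList base.toList then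
                pvRankB (u.toList.drop base.toList.length) else none) == some r)) := by
  induction used generalizing occ with
  | nil => simp
  | cons u us ih =>
      simp only [List.foldl_cons, List.any_cons]
      by_cases hpre : PySem.Chars.startswith u.toList base.toList
      · rw [if_pos hpre]
        cases hrk : pvRankB (u.toList.drop base.toList.length) with
        | none =>
            rw [ih occ hlen]
            simp [hpre]
        | some r' =>
            have hr' : r' < 703 := (pvRank_some _ _ hrk).1
            have hset : (occ.set r' true).getD r false = ((r' == r) || occ.getD r false) := by
              by_cases he : r' = r
              · subst he
                simp [List.getD, (by omega : r' < occ.length)]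
              · simp [List.getD, List.getElem?_set_ne he, he]
            rw [ih (occ.set r' true) (by simp [hlen]), hset]
            simp [hpre, Bool.or_comm, Bool.or_left_comm, Bool.or_assoc]
      · rw [if_neg hpre, ih occ hlen, if_neg hpre]
        simp
-- the boolean table records exactly which decoded candidates occur in `used`
theorem pvOcc_getD (base : String) (used : List String) (r : Nat) (hr : r < 703) :
    (pvOccB base used).getD r false = decide ((base ++ pvDecodeB r) ∈ used) := by
  unfold pvOccB
  rw [pvOcc_fold base used _ (List.length_replicate) r hr]
  rw [show (List.replicate 703 false).getD r false = false by
        rw [List.getD_eq_getElem?_getD, List.getElem?_replicate, if_pos hr]; rfl]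
  rw [Bool.false_or]
  rw [Bool.eq_iff_iff]
  simp only [List.any_eq_true, decide_eq_true_eq]
  constructor
  · rintro ⟨u, hu, hhit⟩
    have := (pvHit_eq base u r hr) ▸ hhit
    simp only [decide_eq_true_eq] at this
    exact this ▸ hu
  · intro hmem
    refine ⟨base ++ pvDecodeB r, hmem, ?_⟩
    rw [pvHit_eq base _ r hr]
    simp

-- find?: pointwise-equal predicates on the members agree
theorem pvFind_congr_mem {α : Type} (p q : α → Bool) (l : List α)
    (h : ∀ a ∈ l, p a = q a) : l.find? p = l.find? q := by
  induction l with
  | nil => rfl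
  | cons a l ih =>
      simp only [List.find?_cons]
      rw [h a (by simp)]
      split
      · rfl
      · exact ih (fun a ha => h a (by simp [ha]))

-- ===== VERDICT (by name: the statement is the Claim_ definition above) =====
theorem find_unique_nearby_code_py_spec : Claim_equal_find_unique_nearby_code_py := by
  intro base_code used _
  unfold Spec_find_unique_nearby_code_py
  -- B in terms of a Nat-indexed rank search
  have hB : find_unique_nearby_code_py_alt base_code used
      = (match (List.range 703).find? (fun k => !((pvOccB base_code used).getD k false)) with
         | some k => base_code ++ pvDecodeB k
         | none => pvNumLoopB base_code used (used.length + 1) 1) := by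
    unfold find_unique_nearby_code_py_alt
    rw [show PySem.List.pyRange 0 703 1 = (List.range 703).map (fun k : Nat => (k : Int)) from by
          rw [PySem.List.pyRange_one]
          norm_num [show Int.toNat 703 = 703 from rfl]]
    rw [List.find?_map]
    rw [show ((fun r : Int => !((pvOccB base_code used).getD r.toNat false)) ∘ fun k : Nat => (k : Int))
          = (fun k : Nat => !((pvOccB base_code used).getD k false)) from by
        funext k; simp]
    cases (List.range 703).find? (fun k => !((pvOccB base_code used).getD k false)) <;> rfl
  -- the table test is the membership test, rank by rank
  have hP : (List.range 703).find? (fun k => !((pvOccB base_code used).getD k false))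
          = (List.range 703).find? (fun k => !(used.contains (base_code ++ pvDecodeB k))) := by
    apply pvFind_congr_mem
    intro k hk
    rw [pvOcc_getD base_code used k (List.mem_range.mp hk)]
    simp
  -- the decoded ranks in order are A's candidate stream
  have hC : (List.range 703).map (fun k => base_code ++ pvDecodeB k)
      = base_code :: ((pvSuffixesA.map (fun s => base_code ++ s))
          ++ pvSuffixesA.flatMap (fun s1 => pvSuffixesA.map (fun s2 => base_code ++ s1 ++ s2))) := by
    rw [show (List.range 703).map (fun k => base_code ++ pvDecodeB k)
          = ((List.range 703).map pvDecodeB).map (fun s => base_code ++ s) from by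
            rw [List.map_map]; rfl]
    rw [pvDecode_enum]
    simp only [List.map_cons, List.map_append, List.map_flatMap, List.map_map,
               String.append_empty, Function.comp_def]
    simp only [← String.append_assoc]
  have hAC : List.find? (fun c => !(used.contains c))
        (base_code :: ((pvSuffixesA.map (fun s => base_code ++ s))
          ++ pvSuffixesA.flatMap (fun s1 => pvSuffixesA.map (fun s2 => base_code ++ s1 ++ s2))))
      = Option.map (fun k => base_code ++ pvDecodeB k)
          ((List.range 703).find? (fun k => !(used.contains (base_code ++ pvDecodeB k)))) := by
    rw [← hC, List.find?_map]
    rfl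
  have hA : find_unique_nearby_code_py base_code used
      = (match List.find? (fun c => !(used.contains c))
            (base_code :: ((pvSuffixesA.map (fun s => base_code ++ s))
              ++ pvSuffixesA.flatMap (fun s1 => pvSuffixesA.map (fun s2 => base_code ++ s1 ++ s2)))) with
         | some c => c
         | none => pvNumLoopB base_code used (used.length + 1) 1) := by
    unfold find_unique_nearby_code_py
    rw [pvNumLoop_eq]
    rw [List.find?_cons, List.find?_append]
    by_cases hb : base_code ∈ used
    · rw [show (!used.contains base_code) = false from by simp [hb],
          if_neg (by simp : ¬ (false = true))]
      cases hx : (pvSuffixesA.map (fun s => base_code ++ s)).find? (fun c => !(used.contains c)) with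
      | some c => rfl
      | none =>
          cases hy : (pvSuffixesA.flatMap (fun s1 => pvSuffixesA.map (fun s2 => base_code ++ s1 ++ s2))).find?
              (fun c => !(used.contains c)) <;> rfl
    · rw [show (!used.contains base_code) = true from by simp [hb], if_pos rfl]
  rw [hA, hB, hP, hAC]
  cases (List.range 703).find? (fun k => !(used.contains (base_code ++ pvDecodeB k))) <;> rfl
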